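-- pv_equiv track=rewrite | github.com/alexandre-barroso/tina | phonological_rules.py | create_epenthesis_variants
-- ===== SOURCE A (Python) =====
-- import itertools
--
-- def create_epenthesis_variants(core, positions):
--     """
--     Create variants with epenthesis at specified positions.
--
--     Args:
--         core (str): The core transcription without slashes.
--         positions (list): List of position tuples (start, end, separator).
--
--     Returns:
--         set: Set of variants with epenthesis applied.
--     """
--     epenthesis_variants = set()
--
--     # Process all combinations of epenthesis positions
--     for r in range(1, len(positions) + 1):
--         for positions_subset in itertools.combinations(positions, r):
--             # Create a new variant with epenthesis at selected positions
--             new_variant = list(core)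
--
--             # Apply epenthesis from right to left to avoid affecting indices
--             for start, end, sep_type in sorted(positions_subset, reverse=True):
--                 if sep_type == ".":
--                     # Replace C. with .Ci.
--                     new_variant[start:end+1] = f".{core[start:end]}i."
--                 else:  # sep_type == "/"
--                     # Add i before final /
--                     new_variant.insert(end, "i")
--
--             epenthesis_variants.add(''.join(new_variant))
--
--     return epenthesis_variants
-- ===== SOURCE B (Python) =====
-- import itertools
--
-- def create_epenthesis_variants(core, positions):
--     """Build each subset's variant by one edit on the cached variant of the
--     subset minus its smallest position, instead of replaying every edit from core."""
--     def apply_edit(variant, start, end, sep_type):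
--         if sep_type == ".":
--             return variant[:start] + "." + core[start:end] + "i." + variant[end + 1:]
--         return variant[:end] + "i" + variant[end:]
--
--     variants = set()
--     cache = {(): core}
--     for r in range(1, len(positions) + 1):
--         for subset in itertools.combinations(positions, r):
--             key = tuple(sorted(subset, reverse=True))
--             start, end, sep_type = key[-1]
--             variant = apply_edit(cache[key[:-1]], start, end, sep_type)
--             cache[key] = variant
--             variants.add(variant)
--     return variants
-- ===== Notes on version B (the rewrite author's own statement) =====
-- stated objective: alternative
-- what changed: B memoizes the variant of every subset in a dict keyed by the descending-sorted subset, so each subset's string is produced by a single plain-slicing edit applied to the cached variant of the subset minus its smallest position, instead of replaying all r edits from core for every subset; Pre_ excludes inputs with a '.'-position whose start is negative or exceeds end+1, where A's value is an accident of CPython slice-assignment wraparound/crossed-bound clamping and B's plain slicing may differ.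
-- outside the precondition, e.g. on create_epenthesis_variants('abc', [(2, 0, '.')]): A returns {'ab.i.c'}, B returns {'ab.i.bc'}; on create_epenthesis_variants('ab', [(-1, -3, '.')]): A returns {'a.i.b'}, B returns {'a.i.ab'}
import Mathlib
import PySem

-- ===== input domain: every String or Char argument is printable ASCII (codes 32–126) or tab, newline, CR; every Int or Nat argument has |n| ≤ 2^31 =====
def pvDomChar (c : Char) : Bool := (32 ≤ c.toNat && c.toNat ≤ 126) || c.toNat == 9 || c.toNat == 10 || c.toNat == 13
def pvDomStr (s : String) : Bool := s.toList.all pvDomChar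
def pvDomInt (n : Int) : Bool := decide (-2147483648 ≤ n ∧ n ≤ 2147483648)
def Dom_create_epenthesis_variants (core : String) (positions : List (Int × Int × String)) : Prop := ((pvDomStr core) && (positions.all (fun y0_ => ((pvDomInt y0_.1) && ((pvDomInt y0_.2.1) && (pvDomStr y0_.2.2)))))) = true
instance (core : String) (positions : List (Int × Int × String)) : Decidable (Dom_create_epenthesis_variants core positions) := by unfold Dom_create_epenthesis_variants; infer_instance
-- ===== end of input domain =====

-- B builds each subset's variant with ONE plain-slicing edit applied to the cached
-- variant of the subset minus its smallest position (a dict keyed by the sorted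
-- subset), instead of replaying all r edits from `core` for every subset as A does.

-- ===== PORT A =====

-- Python compares the (start, end, sep) tuples lexicographically: encode that
-- order with nested Prod.Lex (Mathlib's plain Prod order is pointwise, not lex).
def pvKey (p : Int × Int × String) : Lex (Int × Lex (Int × String)) :=
  toLex (p.1, toLex (p.2.1, p.2.2))

-- sorted(subset, reverse=True) under Python's tuple order (used by both Pythons)
def pvSortDesc (s : List (Int × Int × String)) : List (Int × Int × String) :=
  PySem.List.sorted s pvKey true

-- CPython list slice assignment xs[a:b] = ys (step 1), exact for every Int a b:
-- both bounds are resolved with clampIdx and the replaced region is [i, max i j).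
def pvSpliceA (xs : List Char) (a b : Int) (ys : List Char) : List Char :=
  let i := PySem.List.clampIdx xs.length a
  let j := PySem.List.clampIdx xs.length b
  xs.take i ++ ys ++ xs.drop (max i j)

-- the body of A's inner `for start, end, sep_type in sorted(...)` loop
-- (f".{core[start:end]}i." spliced char by char; list.insert = PySem.List.insert)
def pvEditA (core : List Char) (new_variant : List Char) (p : Int × Int × String) : List Char :=
  if p.2.2 = "." then
    pvSpliceA new_variant p.1 (p.2.1 + 1)
      ('.' :: PySem.List.slice core (some p.1) (some p.2.1) ++ 'i' :: ['.'])
  else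
    PySem.List.insert new_variant p.2.1 'i'

-- ''.join of a list of single-character strings = String.ofList of the chars
def create_epenthesis_variants (core : String) (positions : List (Int × Int × String)) : List String :=
  (PySem.List.pyRange 1 ((positions.length : Int) + 1)).foldl
    (fun epenthesis_variants r =>
      (PySem.List.combinations positions r.toNat).foldl
        (fun epenthesis_variants positions_subset =>
          let new_variant :=
            (pvSortDesc positions_subset).foldl (pvEditA core.toList) core.toList
          PySem.Set.add epenthesis_variants (String.ofList new_variant))
        epenthesis_variants)
    PySem.Set.empty

-- ===== PORT B =====

-- Source B's apply_edit, plain string slicing ported on the characters: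
-- variant[:start] + "." + core[start:end] + "i." + variant[end+1:]  /  variant[:end] + "i" + variant[end:]
def pvEditB (core : List Char) (variant : List Char) (start stop : Int) (sep_type : String) : List Char :=
  if sep_type = "." then
    PySem.List.slice variant none (some start) ++
      '.' :: PySem.List.slice core (some start) (some stop) ++
      'i' :: '.' :: PySem.List.slice variant (some (stop + 1)) none
  else
    PySem.List.slice variant none (some stop) ++ 'i' :: PySem.List.slice variant (some stop) none

-- one iteration of Source B's inner loop; cache[key[:-1]] is always present (proved below),
-- so the `.getD []` default is never read.
def pvStepB (core : List Char)
    (st : PySem.Dict (List (Int × Int × String)) (List Char) × List String)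
    (positions_subset : List (Int × Int × String)) :
    PySem.Dict (List (Int × Int × String)) (List Char) × List String :=
  let key := pvSortDesc positions_subset
  let p := key.getLast!
  let new_variant := pvEditB core ((st.1.get? key.dropLast).getD []) p.1 p.2.1 p.2.2
  (st.1.insert key new_variant, PySem.Set.add st.2 (String.ofList new_variant))

def create_epenthesis_variants_alt (core : String) (positions : List (Int × Int × String)) : List String :=
  ((PySem.List.pyRange 1 ((positions.length : Int) + 1)).foldl
    (fun st r => (PySem.List.combinations positions r.toNat).foldl (pvStepB core.toList) st)
    (PySem.Dict.empty.insert [] core.toList, PySem.Set.empty)).2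

-- ===== PRECONDITION & SPEC =====
-- Pre_ excludes inputs with a '.'-position whose start is negative or exceeds end+1:
-- there A's value comes from CPython's slice-assignment wraparound/crossed-bound
-- clamping, an accident no caller of this transcription routine would specify,
-- and B's plain slicing may give another string. A still returns on such inputs.
def Pre_create_epenthesis_variants (core : String) (positions : List (Int × Int × String)) : Prop :=
  ∀ p ∈ positions, p.2.2 = "." → 0 ≤ p.1 ∧ p.1 ≤ p.2.1 + 1
instance (core : String) (positions : List (Int × Int × String)) : Decidable (Pre_create_epenthesis_variants core positions) := by unfold Pre_create_epenthesis_variants; infer_instance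

def pvWitness_create_epenthesis_variants : String × (List (Int × Int × String)) :=
  ("akta", [((2 : Int), (3 : Int), "."), ((4 : Int), (4 : Int), "/")])

def Spec_create_epenthesis_variants (core : String) (positions : List (Int × Int × String)) (out : List String) : Prop := out = create_epenthesis_variants_alt core positions
instance (core : String) (positions : List (Int × Int × String)) (out : List String) : Decidable (Spec_create_epenthesis_variants core positions out) := by unfold Spec_create_epenthesis_variants; infer_instance

-- ===== CLAIM (what is proved, stated in full; the proofs are below) =====
def Claim_equal_create_epenthesis_variants : Prop := ∀ (core : String) (positions : List (Int × Int × String)), Dom_create_epenthesis_variants core positions → Pre_create_epenthesis_variants core positions → Spec_create_epenthesis_variants core positions (create_epenthesis_variants core positions)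

-- ===== LEMMAS AND PROOFS =====

-- the variant A computes for a (descending-sorted) subset k: all edits replayed from core
def pvEdits (core : List Char) (k : List (Int × Int × String)) : List Char :=
  k.foldl (pvEditA core) core

lemma pvKey_inj {a b : Int × Int × String} (h : pvKey a = pvKey b) : a = b := by
  cases a; cases b; simpa [pvKey, Prod.ext_iff] using h

lemma pvSortDesc_congr {s t : List (Int × Int × String)} (h : s.Perm t) :
    pvSortDesc s = pvSortDesc t := by
  refine List.Perm.eq_of_pairwise (le := fun a b => pvKey b ≤ pvKey a) ?_ ?_ ?_ ?_
  · exact fun a b _ _ h1 h2 => pvKey_inj (le_antisymm h2 h1)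
  · exact PySem.List.sorted_pairwise_rev s pvKey
  · exact PySem.List.sorted_pairwise_rev t pvKey
  · exact (PySem.List.sorted_perm s pvKey true).trans
      (h.trans (PySem.List.sorted_perm t pvKey true).symm)

lemma pvSortDesc_dropLast (s : List (Int × Int × String)) :
    pvSortDesc ((pvSortDesc s).dropLast) = (pvSortDesc s).dropLast :=
  PySem.List.sorted_rev_eq_self_of_pairwise _ _
    ((PySem.List.sorted_pairwise_rev s pvKey).sublist (List.dropLast_sublist _))

lemma pvGetLast!_eq {α : Type} [Inhabited α] (l : List α) (h : l ≠ []) :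
    l.getLast! = l.getLast h := by
  cases l with
  | nil => exact absurd rfl h
  | cons a as => rfl

lemma pvPyRange_nil {a b : Int} (h : ¬ a < b) : PySem.List.pyRange a b = [] := by
  simp [PySem.List.pyRange, h]

lemma pvTake_drop_self {α : Type} (v : List α) (j : Nat) :
    (v.drop j).take (v.length - j) = v.drop j :=
  List.take_of_length_le (by simp)

-- Source B's apply_edit computes exactly the edit of A's inner loop body,
-- on every position admitted by Pre_
lemma pvEditB_eq (core v : List Char) (p : Int × Int × String)
    (hp : p.2.2 = "." → 0 ≤ p.1 ∧ p.1 ≤ p.2.1 + 1) :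
    pvEditB core v p.1 p.2.1 p.2.2 = pvEditA core v p := by
  unfold pvEditA pvEditB pvSpliceA
  by_cases h : p.2.2 = "."
  · obtain ⟨h0, h1⟩ := hp h
    simp only [h, if_true, PySem.List.slice]
    have hij : PySem.List.clampIdx v.length p.1 ≤ PySem.List.clampIdx v.length (p.2.1 + 1) := by
      unfold PySem.List.clampIdx
      split_ifs <;> omega
    rw [max_eq_right hij]
    simp [pvTake_drop_self]
  · simp only [h, if_false, PySem.List.slice]
    unfold PySem.List.insert PySem.List.sliceIndices
    have hc : (if p.2.1 < 0 then max (p.2.1 + (v.length : Int)) 0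
        else min p.2.1 (v.length : Int)).toNat = PySem.List.clampIdx v.length p.2.1 := by
      unfold PySem.List.clampIdx
      split_ifs <;> omega
    simp only [show ¬ (1 : Int) < 0 by decide, if_false]
    simp [hc, pvTake_drop_self]

lemma pvEdits_concat (core : List Char) (k : List (Int × Int × String)) (p : Int × Int × String) :
    pvEdits core (k ++ [p]) = pvEditA core (pvEdits core k) p := by
  simp [pvEdits, List.foldl_append]

-- one pvStepB step, under the cache invariant
lemma pvStep_eq (core : List Char) (positions : List (Int × Int × String))
    (hpre : ∀ p ∈ positions, p.2.2 = "." → 0 ≤ p.1 ∧ p.1 ≤ p.2.1 + 1) (r : Nat)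
    (hr : 1 ≤ r) (s : List (Int × Int × String)) (hs : s.Sublist positions)
    (hlen : s.length = r)
    (d : PySem.Dict (List (Int × Int × String)) (List Char)) (v : List String)
    (hg : ∀ k val, d.get? k = some val → val = pvEdits core k)
    (hc : ∀ t, t.Subperm positions → t.length < r → (d.get? (pvSortDesc t)).isSome) :
    pvStepB core (d, v) s =
      (d.insert (pvSortDesc s) (pvEdits core (pvSortDesc s)),
       PySem.Set.add v (String.ofList (pvEdits core (pvSortDesc s)))) := by
  have hkp : (pvSortDesc s).Perm s := PySem.List.sorted_perm s pvKey true
  have hklen : (pvSortDesc s).length = r := by rw [hkp.length_eq, hlen]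
  have hne : pvSortDesc s ≠ [] := by
    intro h; rw [h] at hklen; simp at hklen; omega
  have hsubp : (pvSortDesc s).dropLast.Subperm positions :=
    (((List.dropLast_sublist (pvSortDesc s)).subperm.trans hkp.subperm).trans hs.subperm)
  have hlt : (pvSortDesc s).dropLast.length < r := by
    rw [List.length_dropLast, hklen]; omega
  have hsome := hc _ hsubp hlt
  rw [pvSortDesc_dropLast] at hsome
  obtain ⟨val, hval⟩ := Option.isSome_iff_exists.mp hsome
  have hv : val = pvEdits core (pvSortDesc s).dropLast := hg _ _ hval
  have hdec : (pvSortDesc s).dropLast ++ [(pvSortDesc s).getLast!] = pvSortDesc s := by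
    rw [pvGetLast!_eq _ hne]; exact List.dropLast_concat_getLast hne
  have hmem : (pvSortDesc s).getLast! ∈ positions := by
    rw [pvGetLast!_eq _ hne]
    exact hs.mem (hkp.mem_iff.mp (List.getLast_mem hne))
  unfold pvStepB
  simp only [hval, Option.getD_some, hv, pvEditB_eq core _ _ (hpre _ hmem)]
  rw [← pvEdits_concat, hdec]

-- one full inner round (all subsets of one size r)
lemma pvInner (core : List Char) (positions : List (Int × Int × String))
    (hpre : ∀ p ∈ positions, p.2.2 = "." → 0 ≤ p.1 ∧ p.1 ≤ p.2.1 + 1) (r : Nat)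
    (hr : 1 ≤ r) (C : List (List (Int × Int × String)))
    (hC : ∀ s ∈ C, s.Sublist positions ∧ s.length = r)
    (d : PySem.Dict (List (Int × Int × String)) (List Char)) (v : List String)
    (hg : ∀ k val, d.get? k = some val → val = pvEdits core k)
    (hc : ∀ t, t.Subperm positions → t.length < r → (d.get? (pvSortDesc t)).isSome) :
    (C.foldl (pvStepB core) (d, v)).2
        = C.foldl (fun v s => PySem.Set.add v (String.ofList (pvEdits core (pvSortDesc s)))) v
    ∧ (∀ k val, (C.foldl (pvStepB core) (d, v)).1.get? k = some val → val = pvEdits core k)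
    ∧ (∀ k, (d.get? k).isSome → ((C.foldl (pvStepB core) (d, v)).1.get? k).isSome)
    ∧ (∀ s ∈ C, ((C.foldl (pvStepB core) (d, v)).1.get? (pvSortDesc s)).isSome) := by
  induction C generalizing d v with
  | nil => exact ⟨rfl, hg, fun k h => h, by simp⟩
  | cons s C ih =>
    obtain ⟨hs, hlen⟩ := hC s (List.mem_cons_self ..)
    have hstep := pvStep_eq core positions hpre r hr s hs hlen d v hg hc
    have hg' : ∀ k val,
        (d.insert (pvSortDesc s) (pvEdits core (pvSortDesc s))).get? k = some val →
        val = pvEdits core k := by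
      intro k val h
      rw [PySem.Dict.get?_insert] at h
      split at h
      · next heq => cases h; rw [heq]
      · exact hg _ _ h
    have hmono : ∀ k, (d.get? k).isSome →
        ((d.insert (pvSortDesc s) (pvEdits core (pvSortDesc s))).get? k).isSome := by
      intro k h
      rw [PySem.Dict.get?_insert]
      split
      · simp
      · exact h
    have hc' : ∀ t, t.Subperm positions → t.length < r →
        ((d.insert (pvSortDesc s) (pvEdits core (pvSortDesc s))).get? (pvSortDesc t)).isSome :=
      fun t h1 h2 => hmono _ (hc t h1 h2)
    obtain ⟨ih1, ih2, ih3, ih4⟩ := ih (fun s hm => hC s (List.mem_cons_of_mem _ hm)) _ _ hg' hc'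
    simp only [List.foldl_cons, hstep]
    refine ⟨ih1, ih2, ?_, ?_⟩
    · intro k h
      exact ih3 _ (hmono _ h)
    · intro t ht
      rcases List.mem_cons.mp ht with h | h
      · subst h
        apply ih3
        rw [PySem.Dict.get?_insert_self]; rfl
      · exact ih4 _ h

-- the outer loop over sizes a, a+1, …, len(positions)
lemma pvOuter (core : List Char) (positions : List (Int × Int × String))
    (hpre : ∀ p ∈ positions, p.2.2 = "." → 0 ≤ p.1 ∧ p.1 ≤ p.2.1 + 1) (a : Nat)
    (ha : 1 ≤ a)
    (d : PySem.Dict (List (Int × Int × String)) (List Char)) (v : List String)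
    (hg : ∀ k val, d.get? k = some val → val = pvEdits core k)
    (hc : ∀ t, t.Subperm positions → t.length < a → (d.get? (pvSortDesc t)).isSome) :
    ((PySem.List.pyRange (a : Int) ((positions.length : Int) + 1)).foldl
        (fun st r => (PySem.List.combinations positions r.toNat).foldl (pvStepB core) st)
        (d, v)).2
      = (PySem.List.pyRange (a : Int) ((positions.length : Int) + 1)).foldl
        (fun v r => (PySem.List.combinations positions r.toNat).foldl
            (fun v s => PySem.Set.add v (String.ofList (pvEdits core (pvSortDesc s)))) v) v := by
  by_cases hab : (a : Int) < (positions.length : Int) + 1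
  · rw [PySem.List.pyRange_one_cons hab]
    simp only [List.foldl_cons, Int.toNat_natCast]
    have hC : ∀ s ∈ PySem.List.combinations positions a, s.Sublist positions ∧ s.length = a :=
      fun s hm => (PySem.List.mem_combinations_iff positions a s).mp hm
    obtain ⟨h1, h2, h3, h4⟩ := pvInner core positions hpre a ha _ hC d v hg hc
    have hc' : ∀ t, t.Subperm positions → t.length < a + 1 →
        (((PySem.List.combinations positions a).foldl (pvStepB core) (d, v)).1.get?
          (pvSortDesc t)).isSome := by
      intro t hsub hlt
      rcases Nat.lt_succ_iff_lt_or_eq.mp hlt with h | h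
      · exact h3 _ (hc t hsub h)
      · obtain ⟨u, hperm, husub⟩ := hsub
        have hu : u ∈ PySem.List.combinations positions a := by
          refine (PySem.List.mem_combinations_iff positions a u).mpr ⟨husub, ?_⟩
          rw [hperm.length_eq, h]
        have := h4 u hu
        rwa [pvSortDesc_congr hperm] at this
    have hrec := pvOuter core positions hpre (a + 1) (by omega)
      ((PySem.List.combinations positions a).foldl (pvStepB core) (d, v)).1
      ((PySem.List.combinations positions a).foldl (pvStepB core) (d, v)).2 h2 hc'
    rw [Prod.mk.eta] at hrec
    rw [show ((a : Int) + 1) = ((a + 1 : Nat) : Int) by push_cast; ring, ← h1]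
    exact hrec
  · rw [pvPyRange_nil hab]
    rfl
termination_by (positions.length + 1 - a)
decreasing_by
  have : a ≤ positions.length := by exact_mod_cast Int.lt_add_one_iff.mp hab
  omega

-- ===== VERDICT (by name: the statement is the Claim_ definition above) =====
theorem create_epenthesis_variants_spec : Claim_equal_create_epenthesis_variants := by
  intro core positions _ hpre
  unfold Spec_create_epenthesis_variants create_epenthesis_variants create_epenthesis_variants_alt
  have hg : ∀ k val,
      ((PySem.Dict.empty.insert [] core.toList :
        PySem.Dict (List (Int × Int × String)) (List Char))).get? k = some val →
      val = pvEdits core.toList k := by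
    intro k val h
    rw [PySem.Dict.get?_insert] at h
    split at h
    · next heq => cases h; rw [heq]; rfl
    · rw [PySem.Dict.get?_empty] at h; cases h
  have hc : ∀ t, t.Subperm positions → t.length < 1 →
      (((PySem.Dict.empty.insert [] core.toList :
        PySem.Dict (List (Int × Int × String)) (List Char))).get? (pvSortDesc t)).isSome := by
    intro t _ hlt
    have : t = [] := List.length_eq_zero_iff.mp (by omega)
    subst this
    rw [show pvSortDesc [] = [] from rfl, PySem.Dict.get?_insert_self]
    rfl
  have h := pvOuter core.toList positions hpre 1 le_rfl
    (PySem.Dict.empty.insert [] core.toList) PySem.Set.empty hg hc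
  rw [show ((1 : Nat) : Int) = (1 : Int) from rfl] at h
  exact h.symm
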